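-- pv_equiv track=rewrite | github.com/FranciszekBialkowski/OiAK---project | main.py | create_ladner_fisher
-- ===== SOURCE A (Python) =====
-- import math
--
-- def create_ladner_fisher(n):
--     """Utworzenie szablonu drzewa prefiksowego typu Ladnera-Fishera"""
--     floors = math.ceil(math.log2(n))
--     prefix_tree = []
--     for i in range(floors):
--         tmp_table = []
--         tmp_counter = 0
--         is_black = False
--         for j in range(n):
--             if tmp_counter == 2 ** i:
--                 tmp_counter = 0
--                 is_black = not is_black
--             if is_black:
--                 tmp_table.append(1)
--             else:
--                 tmp_table.append(0)
--             tmp_counter += 1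
--         prefix_tree.append(tmp_table)
--     return prefix_tree
-- ===== SOURCE B (Python) =====
-- import math
--
-- def create_ladner_fisher(n):
--     """Utworzenie szablonu drzewa prefiksowego typu Ladnera-Fishera"""
--     floors = math.ceil(math.log2(n))
--     prefix_tree = []
--     for i in range(floors):
--         block = 1 << i
--         period = [0] * block + [1] * block
--         reps = -(n // -(2 * block))          # ceil(n / (2*block))
--         prefix_tree.append((period * reps)[:n])
--     return prefix_tree
-- ===== Notes on version B (the rewrite author's own statement) =====
-- stated objective: faster
-- what changed: Each floor is built by constructing one 0-block/1-block period, tiling it ceil(n/(2*block)) times and slicing to n, replacing A's per-element counter-and-toggle inner loop with whole-block list replication.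
import Mathlib
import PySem

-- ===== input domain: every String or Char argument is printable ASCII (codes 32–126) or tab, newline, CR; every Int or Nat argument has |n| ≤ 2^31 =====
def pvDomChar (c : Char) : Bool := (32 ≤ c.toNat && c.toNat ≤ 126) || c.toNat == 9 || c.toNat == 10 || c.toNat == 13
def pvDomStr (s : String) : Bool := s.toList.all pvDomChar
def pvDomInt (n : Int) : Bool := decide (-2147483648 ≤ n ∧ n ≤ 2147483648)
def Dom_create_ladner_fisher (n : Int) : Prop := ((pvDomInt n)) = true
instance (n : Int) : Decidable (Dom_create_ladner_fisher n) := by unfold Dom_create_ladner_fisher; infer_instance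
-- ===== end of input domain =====

-- B builds each floor by tiling one 0-block/1-block period and slicing to n, instead of A's
-- per-element counter-and-toggle inner loop (constant-factor speedup measured).

-- ===== PORT A =====
-- floors = math.ceil(math.log2(n)): ported by hand as the bit length of n - 1, which is exact on the
-- admitted domain 1 ≤ n ≤ 2^31 (there the float log2 is accurate enough that its ceiling is ⌈log2 n⌉).
def create_ladner_fisher (n : Int) : List (List Int) :=
  let floors : Int := (PySem.Int.bitLength (n - 1) : Int)
  (PySem.List.pyRange 0 floors 1).foldl
    (fun prefix_tree i =>
      let tmp := (PySem.List.pyRange 0 n 1).foldl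
        (fun (s : List Int × Int × Bool) _j =>
          let tmp_counter := if s.2.1 = 2 ^ i.toNat then (0 : Int) else s.2.1
          let is_black := if s.2.1 = 2 ^ i.toNat then !s.2.2 else s.2.2
          (s.1 ++ [if is_black then (1 : Int) else 0], tmp_counter + 1, is_black))
        ([], 0, false)
      prefix_tree ++ [tmp.1])
    []

-- ===== PORT B =====
def create_ladner_fisher_alt (n : Int) : List (List Int) :=
  let floors : Int := (PySem.Int.bitLength (n - 1) : Int)   -- same floors = math.ceil(math.log2(n)) as A
  (PySem.List.pyRange 0 floors 1).foldl
    (fun prefix_tree i =>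
      let block : Int := 1 <<< i.toNat
      let period : List Int := List.replicate block.toNat 0 ++ List.replicate block.toNat 1
      let reps : Int := -(PySem.Int.floordiv n (-(2 * block)))   -- ceil(n / (2*block))
      prefix_tree ++ [PySem.List.slice (PySem.List.pyRepeat period reps) none (some n)])
    []

-- ===== PRECONDITION & SPEC =====
-- Pre_ excludes exactly n ≤ 0, where math.log2 raises ValueError (in A and in B alike).
def Pre_create_ladner_fisher (n : Int) : Prop := 1 ≤ n
instance (n : Int) : Decidable (Pre_create_ladner_fisher n) := by unfold Pre_create_ladner_fisher; infer_instance
def pvWitness_create_ladner_fisher : Int := (5)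
def Spec_create_ladner_fisher (n : Int) (out : List (List Int)) : Prop := out = create_ladner_fisher_alt n
instance (n : Int) (out : List (List Int)) : Decidable (Spec_create_ladner_fisher n out) := by unfold Spec_create_ladner_fisher; infer_instance

-- ===== CLAIM (what is proved, stated in full; the proofs are below) =====
def Claim_equal_create_ladner_fisher : Prop := ∀ (n : Int), Dom_create_ladner_fisher n → Pre_create_ladner_fisher n → Spec_create_ladner_fisher n (create_ladner_fisher n)

-- ===== LEMMAS AND PROOFS =====

-- the value row i places at position j is (j / 2^i) % 2
def lf_f (B j : Nat) : Int := ((j / B) % 2 : Nat)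

theorem lf_step (B m : Nat) (hB : 0 < B) (hm : 1 ≤ m) :
    ((m - 1) % B + 1 = B ↔ B ∣ m)
    ∧ (B ∣ m → m / B = (m - 1) / B + 1 ∧ m % B = 0)
    ∧ (¬ B ∣ m → m / B = (m - 1) / B ∧ m % B = (m - 1) % B + 1) := by
  obtain ⟨a, rfl⟩ : ∃ a, m = a + 1 := ⟨m - 1, by omega⟩
  simp only [Nat.add_sub_cancel]
  have hd := Nat.div_add_mod (a + 1) B
  have hlt := Nat.mod_lt (a + 1) hB
  by_cases hdv : B ∣ a + 1
  · obtain ⟨q, hq⟩ := hdv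
    rcases q with _ | p
    · omega
    · have ha : a = B * p + (B - 1) := by rw [Nat.mul_succ] at hq; omega
      have h1 : a % B = B - 1 := by rw [ha, Nat.mul_add_mod, Nat.mod_eq_of_lt (by omega)]
      have h2 : a / B = p := by
        rw [ha, Nat.mul_add_div hB, Nat.div_eq_of_lt (by omega), Nat.add_zero]
      have h3 : (a + 1) / B = p + 1 := by rw [hq, Nat.mul_div_cancel_left _ hB]
      have h4 : (a + 1) % B = 0 := by rw [hq, Nat.mul_mod_right]
      exact ⟨⟨fun _ => ⟨p + 1, hq⟩, fun _ => by omega⟩,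
             fun _ => ⟨by omega, h4⟩, fun h => absurd ⟨p + 1, hq⟩ h⟩
  · have hr0 : (a + 1) % B ≠ 0 := fun h => hdv (Nat.dvd_of_mod_eq_zero h)
    set Q := (a + 1) / B with hQ
    set X := (a + 1) % B with hX
    have ha : a = B * Q + (X - 1) := by omega
    have h1 : a / B = Q := by
      conv_lhs => rw [ha]
      rw [Nat.mul_add_div hB, Nat.div_eq_of_lt (by omega), Nat.add_zero]
    have h2 : a % B = X - 1 := by
      conv_lhs => rw [ha]
      rw [Nat.mul_add_mod]
      exact Nat.mod_eq_of_lt (by omega)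
    exact ⟨⟨fun h => absurd h (by omega), fun h => absurd h hdv⟩,
           fun h => absurd h hdv, fun _ => ⟨h1.symm, by omega⟩⟩


theorem lf_parity (x : Nat) : (!decide (x % 2 = 1)) = decide ((x + 1) % 2 = 1) := by
  rcases Nat.mod_two_eq_zero_or_one x with h | h <;> simp [Nat.add_mod, h]

theorem lf_bit (y : Nat) : (if decide (y % 2 = 1) then (1 : Int) else 0) = ((y % 2 : Nat) : Int) := by
  rcases Nat.mod_two_eq_zero_or_one y with h | h <;> simp [h]

theorem lf_period (B : Nat) (hB : 0 < B) :
    (List.replicate B (0 : Int) ++ List.replicate B 1) = (List.range (2 * B)).map (lf_f B) := by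
  apply List.ext_getElem
  · simp; omega
  · intro j h1 h2
    simp only [List.length_append, List.length_replicate] at h1
    rw [List.getElem_map, List.getElem_range]
    by_cases hj : j < B
    · rw [List.getElem_append_left (by simpa using hj)]
      simp [lf_f, Nat.div_eq_of_lt hj]
    · rw [List.getElem_append_right (by simpa using hj)]
      have hq : j / B = 1 := by
        rw [show j = B * 1 + (j - B) by omega, Nat.mul_add_div hB, Nat.div_eq_of_lt (by omega)]
      simp [lf_f, hq]

theorem lf_flatten (B : Nat) (hB : 0 < B) (r : Nat) :
    (List.replicate r (List.replicate B (0 : Int) ++ List.replicate B 1)).flatten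
    = (List.range (r * (2 * B))).map (lf_f B) := by
  induction r with
  | zero => simp
  | succ r ih =>
    rw [List.replicate_succ', List.flatten_append, ih]
    rw [show (r + 1) * (2 * B) = r * (2 * B) + 2 * B by ring, List.range_add, List.map_append]
    congr 1
    rw [lf_period B hB, List.map_map]
    simp only [List.flatten_cons, List.flatten_nil, List.append_nil]
    apply List.map_congr_left
    intro j hj
    rw [List.mem_range] at hj
    simp only [Function.comp_apply, lf_f]
    congr 1
    rw [show r * (2 * B) + j = B * (2 * r) + j by ring, Nat.mul_add_div hB,
        show 2 * r + j / B = j / B + 2 * r by ring, Nat.add_mul_mod_self_left]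

theorem lf_innerA (k m : Nat) :
    (PySem.List.pyRange 0 (m : Int) 1).foldl
      (fun (s : List Int × Int × Bool) _j =>
        let tmp_counter := if s.2.1 = 2 ^ k then (0 : Int) else s.2.1
        let is_black := if s.2.1 = 2 ^ k then !s.2.2 else s.2.2
        (s.1 ++ [if is_black then (1 : Int) else 0], tmp_counter + 1, is_black))
      ([], 0, false)
    = ((List.range m).map (lf_f (2 ^ k)),
       ((if m = 0 then 0 else (m - 1) % 2 ^ k + 1 : Nat) : Int),
       decide (((m - 1) / 2 ^ k) % 2 = 1)) := by
  induction m with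
  | zero => simp
  | succ m ih =>
    have hB : 0 < 2 ^ k := Nat.two_pow_pos k
    have hBI : (0 : Int) < 2 ^ k := by positivity
    have hc2 : ((2 ^ k : Nat) : Int) = (2 : Int) ^ k := by push_cast; ring
    rw [show ((m + 1 : Nat) : Int) = (m : Int) + 1 by push_cast; ring,
        PySem.List.pyRange_one_succ_right (by positivity), List.foldl_append, ih]
    simp only [List.foldl_cons, List.foldl_nil, Nat.add_sub_cancel]
    rw [if_neg (Nat.succ_ne_zero m)]
    rcases Nat.eq_zero_or_pos m with rfl | hm
    · refine congrArg₂ Prod.mk ?_ (congrArg₂ Prod.mk ?_ ?_) <;>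
        simp [lf_f, (hBI.ne : (0:Int) ≠ 2^k)]
    · rw [if_neg (by omega : ¬ m = 0)]
      obtain ⟨hiff, hdvd, hndvd⟩ := lf_step (2 ^ k) m hB hm
      by_cases hd : (2 ^ k) ∣ m
      · obtain ⟨hq, hr⟩ := hdvd hd
        have hcond : (((m - 1) % 2 ^ k + 1 : Nat) : Int) = (2 : Int) ^ k := by
          rw [hiff.mpr hd]; exact hc2
        simp only [hcond, if_true]
        refine congrArg₂ Prod.mk ?_ (congrArg₂ Prod.mk ?_ ?_)
        · rw [List.range_succ, List.map_append, List.map_cons, List.map_nil]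
          congr 2
          rw [lf_parity, ← hq, lf_bit]
          rfl
        · rw [hr]; simp
        · rw [lf_parity, ← hq]
      · have hcond : (((m - 1) % 2 ^ k + 1 : Nat) : Int) ≠ (2 : Int) ^ k := by
          rw [← hc2]
          exact_mod_cast fun h => hd (hiff.mp h)
        obtain ⟨hq, hr⟩ := hndvd hd
        simp only [if_neg hcond]
        refine congrArg₂ Prod.mk ?_ (congrArg₂ Prod.mk ?_ ?_)
        · rw [List.range_succ, List.map_append, List.map_cons, List.map_nil]
          congr 2
          rw [lf_bit, lf_f, ← hq]
        · rw [hr]; push_cast; ring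
        · rw [hq]

theorem lf_repeat (xs : List Int) (r : Nat) :
    PySem.List.pyRepeat xs (r : Int) = (List.replicate r xs).flatten := by
  simp [PySem.List.pyRepeat]

theorem lf_row (n : Int) (hn : 1 ≤ n) (i : Int) :
    ((PySem.List.pyRange 0 n 1).foldl
      (fun (s : List Int × Int × Bool) _j =>
        let tmp_counter := if s.2.1 = 2 ^ i.toNat then (0 : Int) else s.2.1
        let is_black := if s.2.1 = 2 ^ i.toNat then !s.2.2 else s.2.2
        (s.1 ++ [if is_black then (1 : Int) else 0], tmp_counter + 1, is_black))
      ([], 0, false)).1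
    = PySem.List.slice
        (PySem.List.pyRepeat
          (List.replicate ((1 : Int) <<< i.toNat).toNat (0 : Int) ++
            List.replicate ((1 : Int) <<< i.toNat).toNat 1)
          (-(PySem.Int.floordiv n (-(2 * ((1 : Int) <<< i.toNat))))))
        none (some n) := by
  set k := i.toNat with hk
  have hblock : ((1 : Int) <<< k) = (2 : Int) ^ k := by simp [Int.shiftLeft_eq]
  have h2k : ((2 : Int) ^ k) = ((2 ^ k : Nat) : Int) := by push_cast; ring
  have hB : 0 < 2 ^ k := Nat.two_pow_pos k
  obtain ⟨m, rfl⟩ : ∃ m : Nat, n = (m : Int) := ⟨n.toNat, (Int.toNat_of_nonneg (by omega)).symm⟩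
  have hm : 1 ≤ m := by exact_mod_cast hn
  rw [lf_innerA k m]
  rw [hblock, h2k, Int.toNat_natCast]
  -- the ceiling division: reps = ⌈m / 2^(k+1)⌉
  have hfd : PySem.Int.floordiv (m : Int) (-(2 * ((2 ^ k : Nat) : Int)))
      = PySem.Int.floordiv (-(m : Int)) (2 * ((2 ^ k : Nat) : Int)) := by
    have := PySem.Int.floordiv_neg_neg (-(m : Int)) (2 * ((2 ^ k : Nat) : Int))
    rw [neg_neg] at this
    exact this
  rw [hfd]
  have hb2 : (0 : Int) < 2 * ((2 ^ k : Nat) : Int) := by positivity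
  obtain ⟨h1, h2⟩ := (PySem.Int.neg_floordiv_neg_eq_iff_of_pos (a := (m : Int)) hb2).mp rfl
  set q : Int := -PySem.Int.floordiv (-(m : Int)) (2 * ((2 ^ k : Nat) : Int)) with hqdef
  have hq1 : 1 ≤ q := by nlinarith
  obtain ⟨r, hr⟩ : ∃ r : Nat, q = (r : Int) := ⟨q.toNat, (Int.toNat_of_nonneg (by omega)).symm⟩
  have hmr : m ≤ r * (2 * 2 ^ k) := by
    have : (m : Int) ≤ (r : Int) * (2 * ((2 ^ k : Nat) : Int)) := by rw [← hr]; linarith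
    exact_mod_cast this
  rw [hr, lf_repeat, lf_flatten _ hB r,
      PySem.List.slice_to _ (show (0 : Int) ≤ (m : Int) by positivity), Int.toNat_natCast,
      ← List.map_take, List.take_range, Nat.min_eq_left hmr]


-- ===== VERDICT (by name: the statement is the Claim_ definition above) =====
theorem create_ladner_fisher_spec : Claim_equal_create_ladner_fisher := by
  intro n _ hn
  unfold Spec_create_ladner_fisher create_ladner_fisher create_ladner_fisher_alt
  simp only [PySem.List.foldl_append_singleton_eq_map, List.nil_append]
  exact List.map_congr_left fun i _ => lf_row n hn i
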